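-- pv_equiv track=rewrite | github.com/vkvats/LeetCodeSolutions | inProgress/1304_sumZero.py | sumZero
-- ===== SOURCE A (Python) =====
-- def sumZero(n):
--     arr =[]
--     if n % 2 !=0:
--         num = -1* (n//2)
--         for i in range(n):
--             arr.append(num)
--             num +=1
--     else:
--         num = -1*(n//2)
--         for i in range(n):
--             if num ==0:
--                 num +=1
--             arr.append(num)
--             num +=1
--     return arr, sum(arr)
-- ===== SOURCE B (Python) =====
-- def sumZero(n):
--     pos = list(range(1, n // 2 + 1))
--     pad = [0] * (n - 2 * len(pos))
--     return [-x for x in reversed(pos)] + pad + pos, 0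
-- ===== Notes on version B (the rewrite author's own statement) =====
-- stated objective: simpler
-- what changed: Instead of A's counter loop over all n slots with an in-loop zero-skip branch, B builds only the positive half once, obtains the negative half by reflecting it, pads the middle with a replicated-zero block whose length is n minus twice the half's length, and returns the sum as a constant (zero by symmetry) instead of summing the list.
import Mathlib
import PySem

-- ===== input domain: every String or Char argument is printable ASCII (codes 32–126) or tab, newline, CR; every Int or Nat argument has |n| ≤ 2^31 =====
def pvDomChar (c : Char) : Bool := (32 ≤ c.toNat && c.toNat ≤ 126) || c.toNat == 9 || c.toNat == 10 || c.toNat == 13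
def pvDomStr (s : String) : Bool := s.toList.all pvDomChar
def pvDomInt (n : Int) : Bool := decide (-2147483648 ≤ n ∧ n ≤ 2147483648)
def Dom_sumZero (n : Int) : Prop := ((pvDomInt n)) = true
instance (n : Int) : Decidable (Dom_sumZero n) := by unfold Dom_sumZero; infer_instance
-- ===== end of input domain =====

-- B builds only the positive half, reflects it for the negative half, pads the middle with
-- [0]*(n-2*len(pos)), and returns the sum as the literal 0; A loops a counter over all n slots.

-- ===== PORT A =====
-- loop body of the odd branch: arr.append(num); num += 1
def stepOddA (s : List Int × Int) (_ : Int) : List Int × Int :=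
  (s.1 ++ [s.2], s.2 + 1)

-- loop body of the even branch: if num == 0: num += 1; arr.append(num); num += 1
def stepEvenA (s : List Int × Int) (_ : Int) : List Int × Int :=
  let v := if s.2 = 0 then s.2 + 1 else s.2
  (s.1 ++ [v], v + 1)

def sumZero (n : Int) : List Int × Int :=
  if PySem.Int.mod n 2 ≠ 0 then
    let s := (PySem.List.pyRange 0 n 1).foldl stepOddA ([], -1 * PySem.Int.floordiv n 2)
    (s.1, s.1.foldl (· + ·) 0)
  else
    let s := (PySem.List.pyRange 0 n 1).foldl stepEvenA ([], -1 * PySem.Int.floordiv n 2)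
    (s.1, s.1.foldl (· + ·) 0)

-- ===== PORT B =====
def sumZero_alt (n : Int) : List Int × Int :=
  let pos := PySem.List.pyRange 1 (PySem.Int.floordiv n 2 + 1) 1
  -- [0] * m : Python repeats max(m, 0) times, exactly List.replicate m.toNat
  let pad := List.replicate (n - 2 * (pos.length : Int)).toNat (0 : Int)
  (pos.reverse.map (fun x => -x) ++ pad ++ pos, 0)

-- ===== PRECONDITION & SPEC =====
def Spec_sumZero (n : Int) (out : List Int × Int) : Prop := out = sumZero_alt n
instance (n : Int) (out : List Int × Int) : Decidable (Spec_sumZero n out) := by unfold Spec_sumZero; infer_instance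

-- ===== CLAIM (what is proved, stated in full; the proofs are below) =====
def Claim_equal_sumZero : Prop := ∀ (n : Int), Dom_sumZero n → Spec_sumZero n (sumZero n)

-- ===== LEMMAS AND PROOFS =====

-- A's odd-branch loop appends num, num+1, … : it produces the contiguous range from a.
lemma oddLoop (xs : List Int) : ∀ (l : List Int) (a : Int),
    xs.foldl stepOddA (l, a) = (l ++ PySem.List.pyRange a (a + xs.length) 1, a + xs.length) := by
  induction xs with
  | nil => intro l a; simp [PySem.List.pyRange_one_eq_nil]
  | cons x xs ih =>
    intro l a
    simp only [List.foldl_cons, stepOddA, List.length_cons]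
    rw [ih (l ++ [a]) (a + 1)]
    have hc : ((xs.length + 1 : ℕ) : Int) = (xs.length : Int) + 1 := by push_cast; ring
    rw [hc]
    have hc2 : a + 1 + (xs.length : Int) = a + ((xs.length : Int) + 1) := by ring
    rw [hc2]
    rw [PySem.List.pyRange_one_cons (by omega : a < a + ((xs.length : Int) + 1))]
    simp [List.append_assoc]

-- A's even-branch loop, on a stretch of num values that never hits 0, is the same range loop.
lemma evenLoop (xs : List Int) : ∀ (l : List Int) (a : Int),
    (0 < a ∨ a + xs.length ≤ 0) →
    xs.foldl stepEvenA (l, a) = (l ++ PySem.List.pyRange a (a + xs.length) 1, a + xs.length) := by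
  induction xs with
  | nil => intro l a _; simp [PySem.List.pyRange_one_eq_nil]
  | cons x xs ih =>
    intro l a h
    simp only [List.length_cons] at h
    push_cast at h
    have ha : a ≠ 0 := by omega
    simp only [List.foldl_cons, stepEvenA, List.length_cons, if_neg ha]
    rw [ih (l ++ [a]) (a + 1) (by omega)]
    have hc : ((xs.length + 1 : ℕ) : Int) = (xs.length : Int) + 1 := by push_cast; ring
    rw [hc]
    have hc2 : a + 1 + (xs.length : Int) = a + ((xs.length : Int) + 1) := by ring
    rw [hc2]
    rw [PySem.List.pyRange_one_cons (by omega : a < a + ((xs.length : Int) + 1))]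
    simp [List.append_assoc]

-- the negative half of the symmetric range is the reflection of the positive half
lemma mirror (m : Nat) :
    PySem.List.pyRange (-(m : Int)) 0 1 =
      ((PySem.List.pyRange 1 ((m : Int) + 1) 1).reverse.map (fun x => -x)) := by
  induction m with
  | zero => simp [PySem.List.pyRange_one_eq_nil]
  | succ m ih =>
    have h1 : PySem.List.pyRange (-((m + 1 : Nat) : Int)) 0 1 =
        (-((m + 1 : Nat) : Int)) :: PySem.List.pyRange (-((m + 1 : Nat) : Int) + 1) 0 1 :=
      PySem.List.pyRange_one_cons (by push_cast; omega)
    have h2 : (-((m + 1 : Nat) : Int) + 1) = -(m : Int) := by push_cast; ring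
    have h3 : ((m + 1 : Nat) : Int) + 1 = ((m : Int) + 1) + 1 := by push_cast; ring
    rw [h1, h2, ih, h3,
      PySem.List.pyRange_one_succ_right (by omega : (1 : Int) ≤ (m : Int) + 1)]
    simp

-- sum of a reflected list cancels the list, zeros pad for free
lemma sum_map_neg (l : List Int) : (l.map (fun x => -x)).sum = -l.sum := by
  induction l with
  | nil => simp
  | cons x xs ih => simp [ih]; ring

lemma sum_mirror (pos : List Int) (m : Nat) :
    (pos.reverse.map (fun x => -x) ++ List.replicate m (0 : Int) ++ pos).foldl (· + ·) 0 = 0 := by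
  have h := PySem.List.foldl_add
    (l := pos.reverse.map (fun x => -x) ++ List.replicate m (0 : Int) ++ pos)
    (g := fun x => x) (a := 0)
  simp only [List.map_id'] at h
  rw [h]
  simp [sum_map_neg]

lemma arr_eq (n : Int) : sumZero n = sumZero_alt n := by
  have hf : PySem.Int.floordiv n 2 = n / 2 := PySem.Int.floordiv_eq_ediv_of_pos (by norm_num)
  have hm : PySem.Int.mod n 2 = n % 2 := PySem.Int.mod_eq_emod_of_pos (by norm_num)
  have hmr : n % 2 = 0 ∨ n % 2 = 1 := by omega
  unfold sumZero sumZero_alt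
  rw [hf, hm]
  set k : Int := n / 2 with hk
  by_cases hkpos : 0 ≤ k ∧ 0 < n
  · -- positive n : the list is the symmetric block, its sum telescopes to 0
    obtain ⟨hk0, hn0⟩ := hkpos
    have hpos_len : (PySem.List.pyRange 1 (k + 1) 1).length = k.toNat := by
      rw [PySem.List.length_pyRange_one]; omega
    have hmirror : PySem.List.pyRange (-k) 0 1 =
        ((PySem.List.pyRange 1 (k + 1) 1).reverse.map (fun x => -x)) := by
      have := mirror k.toNat
      have hc : ((k.toNat : Nat) : Int) = k := by omega
      rwa [hc] at this
    rcases hmr with hpar | hpar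
    · -- even n = 2k, k ≥ 1
      have hn : n = 2 * k := by omega
      have hk1 : 1 ≤ k := by omega
      rw [if_neg (by simp [hpar])]
      simp only [neg_one_mul]
      have hpad : (n - 2 * ((PySem.List.pyRange 1 (k + 1) 1).length : Int)).toNat = 0 := by
        rw [hpos_len]; omega
      -- evaluate A's loop: -k..-1 then the zero-skip step then 2..k
      rw [PySem.List.pyRange_one_append (a := 0) (m := k) (b := n) (by omega) (by omega),
        List.foldl_append]
      have h1 : (PySem.List.pyRange 0 k 1).foldl stepEvenA ([], -k) =
          (PySem.List.pyRange (-k) 0 1, 0) := by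
        rw [evenLoop _ _ _ (by rw [PySem.List.length_pyRange_one]; omega),
          PySem.List.length_pyRange_one]
        have hc1 : (((k - 0).toNat : ℕ) : Int) = k := by omega
        rw [hc1]; norm_num
      rw [h1, PySem.List.pyRange_one_cons (a := k) (b := n) (by omega)]
      simp only [List.foldl_cons]
      have hstep : stepEvenA (PySem.List.pyRange (-k) 0 1, 0) k =
          (PySem.List.pyRange (-k) 0 1 ++ [1], 2) := by simp [stepEvenA]
      rw [hstep]
      have h2 : (PySem.List.pyRange (k + 1) n 1).foldl stepEvenA
            (PySem.List.pyRange (-k) 0 1 ++ [1], 2) =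
          (PySem.List.pyRange (-k) 0 1 ++ [1] ++ PySem.List.pyRange 2 (k + 1) 1, k + 1) := by
        rw [evenLoop _ _ _ (Or.inl (by norm_num)), PySem.List.length_pyRange_one]
        have hc2 : (((n - (k + 1)).toNat : ℕ) : Int) = k - 1 := by omega
        rw [hc2]
        have e : (2 : Int) + (k - 1) = k + 1 := by omega
        rw [e]
      rw [h2]
      have hjoin : [(1 : Int)] ++ PySem.List.pyRange 2 (k + 1) 1 =
          PySem.List.pyRange 1 (k + 1) 1 := by
        rw [PySem.List.pyRange_one_cons (a := 1) (b := k + 1) (by omega)]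
        norm_num
      have hlist : PySem.List.pyRange (-k) 0 1 ++ [1] ++ PySem.List.pyRange 2 (k + 1) 1 =
          (PySem.List.pyRange 1 (k + 1) 1).reverse.map (fun x => -x) ++
            List.replicate 0 (0 : Int) ++ PySem.List.pyRange 1 (k + 1) 1 := by
        rw [List.append_assoc, hjoin, hmirror]; simp
      rw [hpad, hlist, sum_mirror]
    · -- odd n = 2k + 1
      rw [if_pos (by simp [hpar])]
      simp only [neg_one_mul]
      have hpad : (n - 2 * ((PySem.List.pyRange 1 (k + 1) 1).length : Int)).toNat = 1 := by
        rw [hpos_len]; omega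
      have h1 : (PySem.List.pyRange 0 n 1).foldl stepOddA ([], -k) =
          (PySem.List.pyRange (-k) (k + 1) 1, k + 1) := by
        rw [oddLoop, PySem.List.length_pyRange_one]
        have hc : (((n - 0).toNat : ℕ) : Int) = n := by omega
        rw [hc]
        have e : -k + n = k + 1 := by omega
        rw [e]
        simp
      rw [h1]
      have hlist : PySem.List.pyRange (-k) (k + 1) 1 =
          (PySem.List.pyRange 1 (k + 1) 1).reverse.map (fun x => -x) ++
            List.replicate 1 (0 : Int) ++ PySem.List.pyRange 1 (k + 1) 1 := by
        rw [PySem.List.pyRange_one_append (a := -k) (m := 0) (b := k + 1) (by omega) (by omega),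
          PySem.List.pyRange_one_cons (a := 0) (b := k + 1) (by omega), hmirror]
        norm_num
      rw [hpad, hlist, sum_mirror]
  · -- n ≤ 0 : every list involved is empty
    have hn0 : n ≤ 0 := by omega
    have hkneg : k ≤ 0 := by omega
    have hposnil : PySem.List.pyRange 1 (k + 1) 1 = [] :=
      PySem.List.pyRange_one_eq_nil (by omega)
    have hAnil : PySem.List.pyRange 0 n 1 = [] :=
      PySem.List.pyRange_one_eq_nil (by omega)
    rw [hAnil, hposnil]
    rcases hmr with hpar | hpar
    · rw [if_neg (by simp [hpar])]
      simp; omega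
    · rw [if_pos (by simp [hpar])]
      simp; omega

-- ===== VERDICT (by name: the statement is the Claim_ definition above) =====
theorem sumZero_spec : Claim_equal_sumZero := by
  intro n _
  exact arr_eq n
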